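-- pv_equiv track=rewrite | github.com/Dyn0402/QGP_Scripts | Azimuthal_Correlations/az_corr.py | ampt_str_edges_to_9
-- ===== SOURCE A (Python) =====
-- def ampt_str_edges_to_9(ref_str_edges):
--     edges = [int(edge) for edge in ref_str_edges]
--     edges = sorted(edges, reverse=True)
--     edges_9bin = {8: [1000, edges[0]],  # Set upper edge of most central to very high value
--                   7: [edges[0], edges[1]]}  # Do 0-5% and 5-10% manually
--
--     cent_bin, edge_index = 6, 1
--     while edge_index + 2 < len(edges):
--         edges_9bin.update({cent_bin: [edges[edge_index], edges[edge_index + 2]]})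
--         cent_bin -= 1
--         edge_index += 2
--
--     return edges_9bin
-- ===== SOURCE B (Python) =====
-- def ampt_str_edges_to_9(ref_str_edges):
--     edges = sorted((int(e) for e in ref_str_edges), reverse=True)
--     bounds = [1000, edges[0]] + edges[1::2]
--     return {8 - i: [hi, lo] for i, (hi, lo) in enumerate(zip(bounds, bounds[1:]))}
-- ===== Notes on version B (the rewrite author's own statement) =====
-- stated objective: simpler
-- what changed: Replaces A's stateful while-loop over a bin counter and an edge index that updates a dict in place by a declarative pipeline: build the flat boundary list once (1000, the top edge, then every second edge from index 1), pair consecutive boundaries with zip, and assign bins 8, 7, ... in a dict comprehension.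
import Mathlib
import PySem

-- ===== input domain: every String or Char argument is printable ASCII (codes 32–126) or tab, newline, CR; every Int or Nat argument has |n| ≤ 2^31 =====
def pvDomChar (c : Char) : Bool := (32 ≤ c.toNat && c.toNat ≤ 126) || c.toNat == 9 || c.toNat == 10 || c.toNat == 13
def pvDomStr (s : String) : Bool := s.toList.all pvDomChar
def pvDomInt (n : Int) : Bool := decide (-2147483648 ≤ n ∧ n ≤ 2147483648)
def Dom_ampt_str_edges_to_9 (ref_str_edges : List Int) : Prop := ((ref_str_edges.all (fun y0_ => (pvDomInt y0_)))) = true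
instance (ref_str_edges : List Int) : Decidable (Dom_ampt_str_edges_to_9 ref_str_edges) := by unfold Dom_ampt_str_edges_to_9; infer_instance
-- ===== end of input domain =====

-- B replaces A's stateful while-loop of in-place dict updates by a boundary list + zip + comprehension (objective: simpler).

-- ===== PORT A =====
-- 'while edge_index + 2 < len(edges): edges_9bin.update({cent_bin: [edges[edge_index], edges[edge_index+2]]}); cent_bin -= 1; edge_index += 2'
def amptLoopA (edges : List Int) (cent : Int) (i : Nat) (d : PySem.Dict Int (List Int)) :
    PySem.Dict Int (List Int) :=
  if _h : i + 2 < edges.length then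
    amptLoopA edges (cent - 1) (i + 2)
      (d.insert cent [PySem.List.pyGetD edges (i : Int) 0, PySem.List.pyGetD edges ((i : Int) + 2) 0])
  else d
termination_by edges.length - i

def ampt_str_edges_to_9 (ref_str_edges : List Int) : List (Int × List Int) :=
  let edges := PySem.List.sorted ref_str_edges (fun x => x) true
  -- the two initial reads are in range under Pre_ (len ≥ 2); the loop's indices are always in range
  let edges_9bin := PySem.Dict.ofList
    [((8 : Int), [1000, PySem.List.pyGetD edges 0 0]),
     ((7 : Int), [PySem.List.pyGetD edges 0 0, PySem.List.pyGetD edges 1 0])]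
  (amptLoopA edges 6 1 edges_9bin).items

-- ===== PORT B =====
def ampt_str_edges_to_9_alt (ref_str_edges : List Int) : List (Int × List Int) :=
  let edges := PySem.List.sorted ref_str_edges (fun x => x) true
  -- the flat boundary list: 1000, the top edge, then every second edge from index 1
  let bounds := [1000, PySem.List.pyGetD edges 0 0] ++
    (PySem.List.slice? edges (some 1) none 2).getD []
  -- {8 - i: [hi, lo] for i, (hi, lo) in enumerate(zip(bounds, bounds[1:]))}  (keys 8, 7, … are distinct)
  (PySem.List.enumerate (bounds.zip (PySem.List.slice bounds (some 1) none)) 0).map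
    (fun p => (8 - p.1, [p.2.1, p.2.2]))

-- ===== PRECONDITION & SPEC =====
-- A reads the first two sorted edges unconditionally: it raises IndexError on lists of fewer than 2 elements.
def Pre_ampt_str_edges_to_9 (ref_str_edges : List Int) : Prop := 2 ≤ ref_str_edges.length
instance (ref_str_edges : List Int) : Decidable (Pre_ampt_str_edges_to_9 ref_str_edges) := by
  unfold Pre_ampt_str_edges_to_9; infer_instance

def pvWitness_ampt_str_edges_to_9 : List Int := [15, 47, 8, 23]

def Spec_ampt_str_edges_to_9 (ref_str_edges : List Int) (out : List (Int × List Int)) : Prop :=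
  out = ampt_str_edges_to_9_alt ref_str_edges
instance (ref_str_edges : List Int) (out : List (Int × List Int)) : Decidable (Spec_ampt_str_edges_to_9 ref_str_edges out) := by unfold Spec_ampt_str_edges_to_9; infer_instance

-- ===== CLAIM (what is proved, stated in full; the proofs are below) =====
def Claim_equal_ampt_str_edges_to_9 : Prop := ∀ (ref_str_edges : List Int), Dom_ampt_str_edges_to_9 ref_str_edges → Pre_ampt_str_edges_to_9 ref_str_edges → Spec_ampt_str_edges_to_9 ref_str_edges (ampt_str_edges_to_9 ref_str_edges)

-- ===== LEMMAS AND PROOFS =====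

-- every other element of a list (indices 0, 2, 4, …): the shape of edges[1::2] on the tail
def everyOther : List Int → List Int
  | [] => []
  | [x] => [x]
  | x :: _ :: r => x :: everyOther r

-- consecutive boundary pairs with bins counting down: the chain both programs produce
def pairsDown (c : Int) : List Int → List (Int × List Int)
  | x :: y :: r => (c, [x, y]) :: pairsDown (c - 1) (y :: r)
  | _ => []

theorem everyOther_cons (x : Int) (r : List Int) :
    everyOther (x :: r) = x :: everyOther (r.drop 1) := by
  cases r with
  | nil => rfl
  | cons y r' => rfl

theorem everyOther_drop (xs : List Int) (a : Nat) (h : a < xs.length) :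
    everyOther (xs.drop a) = xs[a] :: everyOther (xs.drop (a + 2)) := by
  rw [List.drop_eq_getElem_cons h, everyOther_cons, List.drop_drop]

theorem filterMap_every (ys : List Int) :
    List.filterMap (fun k => ys[2 * k]?) (List.range ((ys.length + 1) / 2)) = everyOther ys := by
  induction ys using everyOther.induct with
  | case1 => simp [everyOther]
  | case2 x => simp [everyOther]
  | case3 x y r' ih =>
    simp only [List.length_cons]
    have hc : (r'.length + 1 + 1 + 1) / 2 = (r'.length + 1) / 2 + 1 := by omega
    rw [hc, List.range_succ_eq_map, List.filterMap_cons, List.filterMap_map]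
    rw [everyOther]
    have hfun : (fun k => (x :: y :: r')[2 * k]?) ∘ (fun k => k + 1) = fun k : Nat => r'[2 * k]? := by
      funext k
      simp only [Function.comp]
      have h2 : 2 * (k + 1) = 2 * k + 1 + 1 := by omega
      rw [h2]
      simp
    rw [hfun, ih]
    simp

-- edges[1::2] is everyOther of the tail
theorem slice?_one_two (xs : List Int) :
    PySem.List.slice? xs (some 1) none 2 = some (everyOther (xs.drop 1)) := by
  cases xs with
  | nil => rfl
  | cons x r =>
    simp only [PySem.List.slice?, PySem.List.sliceIndices]
    norm_num
    have hcnt : (if 0 < r.length then (((r.length : Int) + 2 - 1) / 2).toNat else 0) = (r.length + 1) / 2 := by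
      split <;> omega
    rw [hcnt]
    have hfun : (fun k : Nat => (x :: r)[((1 : Int) + 2 * (k : Int)).toNat]?) = fun k : Nat => r[2 * k]? := by
      funext k
      have ht : ((1 : Int) + 2 * (k : Int)).toNat = 2 * k + 1 := by omega
      rw [ht]
      simp
    rw [hfun, filterMap_every]

-- B's enumerate/zip comprehension over any boundary list is pairsDown
theorem zip_enum_pairsDown (bs : List Int) (s : Int) :
    (PySem.List.enumerate (bs.zip (PySem.List.slice bs (some 1) none)) s).map
        (fun p => (8 - p.1, [p.2.1, p.2.2]))
      = pairsDown (8 - s) bs := by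
  rw [PySem.List.slice_from_one]
  induction bs generalizing s with
  | nil => simp [pairsDown, PySem.List.enumerate_nil]
  | cons x r ih =>
    cases r with
    | nil => simp [pairsDown, PySem.List.enumerate_nil]
    | cons y r' =>
      simp only [List.tail_cons, List.zip_cons_cons, PySem.List.enumerate_cons, List.map_cons]
      rw [pairsDown]
      have hr := ih (s := s + 1)
      simp only [List.tail_cons] at hr
      rw [hr, show (8 : Int) - s - 1 = 8 - (s + 1) by ring]

-- A's loop appends pairsDown of the remaining boundary chain (keys stay fresh: existing keys exceed cent)
theorem amptLoopA_items (edges : List Int) (cent : Int) (i : Nat) (d : PySem.Dict Int (List Int))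
    (hi : i < edges.length) (hk : ∀ k ∈ d.keys, cent < k) :
    (amptLoopA edges cent i d).items
      = d.items ++ pairsDown cent (edges[i] :: everyOther (edges.drop (i + 2))) := by
  induction cent, i, d using amptLoopA.induct (edges := edges) with
  | case1 cent i d h ih =>
    rw [amptLoopA, dif_pos h]
    have hfresh : d.contains cent = false := by
      by_contra hc
      have hmem : cent ∈ d.keys := (PySem.Dict.contains_iff_mem_keys d cent).mp
        (Bool.of_not_eq_false hc)
      exact absurd (hk cent hmem) (lt_irrefl cent)
    have hk' : ∀ k ∈ (d.insert cent [PySem.List.pyGetD edges (i : Int) 0,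
        PySem.List.pyGetD edges ((i : Int) + 2) 0]).keys, cent - 1 < k := by
      intro k hmem
      rcases (PySem.Dict.mem_keys_insert _ _ _ _).mp hmem with h1 | h2
      · omega
      · have := hk k h2; omega
    rw [ih h hk', PySem.Dict.items_insert_of_not_contains _ _ hfresh,
      everyOther_drop edges (i + 2) h, pairsDown]
    have hg1 : PySem.List.pyGetD edges (i : Int) 0 = edges[i] := by
      rw [PySem.List.pyGetD_natCast]
      exact List.getD_eq_getElem _ _ hi
    have hg2 : PySem.List.pyGetD edges ((i : Int) + 2) 0 = edges[i + 2] := by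
      rw [show ((i : Int) + 2) = ((i + 2 : Nat) : Int) by push_cast; ring, PySem.List.pyGetD_natCast]
      exact List.getD_eq_getElem _ _ h
    rw [hg1, hg2, List.append_assoc]
    rfl
  | case2 cent i d h =>
    rw [amptLoopA, dif_neg h]
    have hdrop : edges.drop (i + 2) = [] := List.drop_eq_nil_of_le (by omega)
    rw [hdrop]
    simp [everyOther, pairsDown]

-- main equivalence
theorem ampt_equal (xs : List Int) (hpre : 2 ≤ xs.length) :
    ampt_str_edges_to_9 xs = ampt_str_edges_to_9_alt xs := by
  have hlen := PySem.List.length_sorted xs (fun x => x) true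
  obtain ⟨e0, e1, rest, hm⟩ : ∃ e0 e1 rest,
      PySem.List.sorted xs (fun x => x) true = e0 :: e1 :: rest := by
    rcases hs : PySem.List.sorted xs (fun x => x) true with _ | ⟨a, _ | ⟨b, r⟩⟩
    · rw [hs] at hlen; simp at hlen; omega
    · rw [hs] at hlen; simp at hlen; omega
    · exact ⟨a, b, r, rfl⟩
  unfold ampt_str_edges_to_9 ampt_str_edges_to_9_alt
  simp only [hm]
  rw [slice?_one_two]
  simp only [Option.getD_some, List.drop_succ_cons, List.drop_zero]
  rw [zip_enum_pairsDown]
  have hkeys : (PySem.Dict.ofList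
      [((8 : Int), [1000, PySem.List.pyGetD (e0 :: e1 :: rest) 0 0]),
       ((7 : Int), [PySem.List.pyGetD (e0 :: e1 :: rest) 0 0,
         PySem.List.pyGetD (e0 :: e1 :: rest) 1 0])]).keys = [8, 7] := rfl
  rw [amptLoopA_items (e0 :: e1 :: rest) 6 1 _ (by simp)
    (by intro k hmem
        rw [hkeys] at hmem
        simp at hmem
        rcases hmem with h | h <;> omega)]
  have hg0 : PySem.List.pyGetD (e0 :: e1 :: rest) 0 0 = e0 := PySem.List.pyGetD_zero_cons _ _ _
  have hg1 : PySem.List.pyGetD (e0 :: e1 :: rest) 1 0 = e1 := by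
    rw [show (1 : Int) = ((1 : Nat) : Int) by norm_num, PySem.List.pyGetD_natCast]; rfl
  have hitems : (PySem.Dict.ofList
      [((8 : Int), [1000, PySem.List.pyGetD (e0 :: e1 :: rest) 0 0]),
       ((7 : Int), [PySem.List.pyGetD (e0 :: e1 :: rest) 0 0,
         PySem.List.pyGetD (e0 :: e1 :: rest) 1 0])]).items
      = [((8 : Int), [1000, PySem.List.pyGetD (e0 :: e1 :: rest) 0 0]),
         ((7 : Int), [PySem.List.pyGetD (e0 :: e1 :: rest) 0 0,
           PySem.List.pyGetD (e0 :: e1 :: rest) 1 0])] := rfl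
  rw [hitems, hg0, hg1]
  have hdrop3 : List.drop (1 + 2) (e0 :: e1 :: rest) = rest.tail := by simp
  rw [hdrop3]
  norm_num [pairsDown, everyOther_cons]

-- ===== VERDICT (by name: the statement is the Claim_ definition above) =====
theorem ampt_str_edges_to_9_spec : Claim_equal_ampt_str_edges_to_9 := by
  intro xs _ hpre
  unfold Spec_ampt_str_edges_to_9
  exact ampt_equal xs hpre
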